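-- pv_equiv track=rewrite | github.com/collinsakenga/codewars_solutions | 6 kyu/Representing Numbers on an Abacus.py | read_abacus
-- ===== SOURCE A (Python) =====
-- def read_abacus(abacus):
--     arr=abacus.split("\n")
--     ans=0
--     for j in range(len(arr[0])):
--         s="".join(arr[i][j] for i in range(len(arr)))
--         up, down=s.split("-")
--         ans=ans*10+(up.index("*")*5+down.index(" "))
--     return ans
-- ===== SOURCE B (Python) =====
-- def _ab_step(st, ch):
--     beam, pre, star, post, space = st
--     if not beam:
--         if ch == '-':
--             return (True, pre, star, post, space)
--         return (False, pre + 1, star if star is not None else (pre if ch == '*' else None), post, space)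
--     return (True, pre, star, post + 1, space if space is not None else (post if ch == ' ' else None))
--
--
-- def read_abacus(abacus):
--     rows = abacus.split("\n")
--     states = [(False, 0, None, 0, None)] * len(rows[0])
--     for row in rows:
--         states = [_ab_step(st, ch) for st, ch in zip(states, row)]
--     ans = 0
--     for _beam, _pre, star, _post, space in states:
--         ans = ans * 10 + star * 5 + space
--     return ans
-- ===== Notes on version B (the rewrite author's own statement) =====
-- stated objective: alternative
-- what changed: A transposes the grid column by column (rebuilding each column string, splitting it on '-' and calling .index twice); B makes a single row-major pass that zips a per-column state tuple (beam seen, heaven '*' offset, count of earth rows, first ' ' offset) through each line and then folds the per-column digits.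
import Mathlib
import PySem

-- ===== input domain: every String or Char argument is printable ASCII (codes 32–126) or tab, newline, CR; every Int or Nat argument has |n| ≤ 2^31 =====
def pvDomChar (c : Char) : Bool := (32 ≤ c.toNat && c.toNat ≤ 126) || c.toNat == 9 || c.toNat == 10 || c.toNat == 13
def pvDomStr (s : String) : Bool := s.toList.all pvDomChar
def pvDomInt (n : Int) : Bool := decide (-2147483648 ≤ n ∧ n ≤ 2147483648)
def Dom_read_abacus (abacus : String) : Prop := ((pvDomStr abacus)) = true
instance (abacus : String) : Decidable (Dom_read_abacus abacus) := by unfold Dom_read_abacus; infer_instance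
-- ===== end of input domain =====

-- B replaces A's per-column transpose-split-index with a single row-major pass maintaining one
-- small state per column (alternative decomposition, same cost).

-- ===== PORT A =====
-- literal transliteration of A: split into lines, then for each column j rebuild the column
-- string, split it on "-" and add up.index("*")*5 + down.index(" ") as the next decimal digit.
def read_abacus (abacus : String) : Int :=
  let arr := PySem.Chars.splitOn abacus.toList ['\n']
  (PySem.List.pyRange 0 (PySem.List.len (PySem.List.pyGetD arr 0 []))).foldl
    (fun ans j =>
      -- s = "".join(arr[i][j] for i in range(len(arr))): arr[i][j] raises IndexError when
      -- j is out of range for a row; those inputs are excluded by Pre_, the ' ' default is junk.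
      let s : List Char := (PySem.List.pyRange 0 (PySem.List.len arr)).map
        (fun i => (PySem.List.pyGet? (PySem.List.pyGetD arr i []) j).getD ' ')
      match PySem.Chars.splitOn s ['-'] with
      | [up, down] =>
          -- .index raises ValueError exactly where find = -1; excluded by Pre_
          ans * 10 + (PySem.Chars.find up ['*'] * 5 + PySem.Chars.find down [' '])
      | _ => 0  -- 'up, down = s.split("-")' raises ValueError here; excluded by Pre_
    ) 0

-- ===== PORT B =====
-- per-column state (beam_seen, rows_before_beam, heaven_star_offset, rows_after_beam, earth_space_offset)
def abStep (st : Bool × Int × Option Int × Int × Option Int) (ch : Char) :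
    Bool × Int × Option Int × Int × Option Int :=
  match st with
  | (beam, pre, star, post, space) =>
    if beam = false then
      if ch = '-' then (true, pre, star, post, space)
      else (false, pre + 1,
            (if star.isSome then star else if ch = '*' then some pre else none), post, space)
    else (true, pre, star, post + 1,
          (if space.isSome then space else if ch = ' ' then some post else none))

-- one row-major pass: zip the state list with each row in turn, then fold the digits.
-- star*5+space raises TypeError in Python where a part is missing (excluded by Pre_); .getD 0 is junk there.
def read_abacus_alt (abacus : String) : Int :=
  let rows := PySem.Chars.splitOn abacus.toList ['\n']
  let init := List.replicate (PySem.List.pyGetD rows 0 []).length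
      ((false, 0, none, 0, none) : Bool × Int × Option Int × Int × Option Int)
  let states := rows.foldl (fun sts row => List.zipWith abStep sts row) init
  states.foldl (fun ans st => ans * 10 + st.2.2.1.getD 0 * 5 + st.2.2.2.2.getD 0) 0

-- ===== PRECONDITION & SPEC =====
-- column j of the grid (under Pre_ every row is long enough, so the ' ' default is unused)
def pvCol (rows : List (List Char)) (j : Nat) : List Char := rows.map (fun r => r.getD j ' ')

-- Pre_ = exactly the inputs on which A returns normally: every line at least as long as the
-- first (else IndexError), and every column has exactly one '-' (else ValueError on unpacking),
-- a '*' above it and a ' ' below it (else ValueError from .index).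
def Pre_read_abacus (abacus : String) : Prop :=
  (∀ r ∈ PySem.Chars.splitOn abacus.toList ['\n'],
      (PySem.List.pyGetD (PySem.Chars.splitOn abacus.toList ['\n']) 0 []).length ≤ r.length) ∧
  ∀ j < (PySem.List.pyGetD (PySem.Chars.splitOn abacus.toList ['\n']) 0 []).length,
    (pvCol (PySem.Chars.splitOn abacus.toList ['\n']) j).count '-' = 1 ∧
    '*' ∈ (pvCol (PySem.Chars.splitOn abacus.toList ['\n']) j).takeWhile (fun c => c ≠ '-') ∧
    ' ' ∈ ((pvCol (PySem.Chars.splitOn abacus.toList ['\n']) j).dropWhile (fun c => c ≠ '-')).tail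

instance (abacus : String) : Decidable (Pre_read_abacus abacus) := by
  unfold Pre_read_abacus; infer_instance

def pvWitness_read_abacus : String := "* \n**\n--\n* \n  "

def Spec_read_abacus (abacus : String) (out : Int) : Prop := out = read_abacus_alt abacus
instance (abacus : String) (out : Int) : Decidable (Spec_read_abacus abacus out) := by
  unfold Spec_read_abacus; infer_instance

-- ===== CLAIM (what is proved, stated in full; the proofs are below) =====
def Claim_equal_read_abacus : Prop := ∀ (abacus : String), Dom_read_abacus abacus →
  Pre_read_abacus abacus → Spec_read_abacus abacus (read_abacus abacus)

-- ===== LEMMAS AND PROOFS =====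

-- structural model of s.split("-") (single-character separator)
def pvSplitDash (pre : List Char) : List Char → List (List Char)
  | [] => [pre]
  | c :: rest => if c = '-' then pre :: pvSplitDash [] rest else pvSplitDash (pre ++ [c]) rest

lemma pvSplitOn_go_eq (fuel : Nat) : ∀ (l cur : List Char) (acc : List (List Char)),
    l.length < fuel →
    PySem.Chars.splitOn.go ['-'] fuel l cur acc = acc.reverse ++ pvSplitDash cur.reverse l := by
  induction fuel with
  | zero => intro l cur acc h; omega
  | succ f ih =>
    intro l cur acc h
    cases l with
    | nil => simp [PySem.Chars.splitOn.go, pvSplitDash]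
    | cons c rest =>
      simp only [PySem.Chars.splitOn.go]
      by_cases hc : c = '-'
      · subst hc
        rw [if_pos (by simp [List.isPrefixOf])]
        rw [ih _ _ _ (by simp at h ⊢; omega)]
        simp [pvSplitDash]
      · rw [if_neg (by simp [List.isPrefixOf]; exact fun h => absurd h.symm hc)]
        rw [ih _ _ _ (by simp at h ⊢; omega)]
        simp [pvSplitDash, hc]

lemma pvSplitDash_no_dash (l : List Char) (h : '-' ∉ l) : ∀ pre, pvSplitDash pre l = [pre ++ l] := by
  induction l with
  | nil => intro pre; simp [pvSplitDash]
  | cons c rest ih =>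
    intro pre
    have hc : c ≠ '-' := by intro hc; exact h (hc ▸ List.mem_cons_self)
    rw [pvSplitDash, if_neg hc, ih (fun hm => h (List.mem_cons_of_mem _ hm))]
    simp

lemma pvSplitDash_mid (up : List Char) (hup : '-' ∉ up) : ∀ (pre rest : List Char),
    pvSplitDash pre (up ++ '-' :: rest) = (pre ++ up) :: pvSplitDash [] rest := by
  induction up with
  | nil => intro pre rest; simp [pvSplitDash]
  | cons c u ih =>
    intro pre rest
    have hc : c ≠ '-' := by intro hc; exact hup (hc ▸ List.mem_cons_self)
    rw [List.cons_append, pvSplitDash, if_neg hc, ih (fun hm => hup (List.mem_cons_of_mem _ hm))]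
    simp

lemma pvSplitOn_decomp (up down : List Char) (hup : '-' ∉ up) (hdown : '-' ∉ down) :
    PySem.Chars.splitOn (up ++ '-' :: down) ['-'] = [up, down] := by
  show PySem.Chars.splitOn.go _ _ _ _ _ = _
  rw [pvSplitOn_go_eq _ _ _ _ (by omega)]
  simp [pvSplitDash_mid up hup, pvSplitDash_no_dash down hdown]

lemma pvIdxOf_le_of_getElem (l : List Char) (c : Char) (k : Nat) (hk : k < l.length)
    (hc : l[k] = c) : l.idxOf c ≤ k := by
  have hm : c ∈ l := hc ▸ List.getElem_mem hk
  have ht : c ∈ l.take (k + 1) := by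
    have h2 : (l.take (k + 1))[k]'(by simp; omega) = c := by
      rw [List.getElem_take]; exact hc
    exact h2 ▸ List.getElem_mem _
  have := (List.mem_take_iff_idxOf_lt hm).mp ht
  omega

lemma pvSingleton_prefix (c : Char) (t : List Char) : [c] <+: t ↔ t.head? = some c := by
  constructor
  · rintro ⟨r, rfl⟩; rfl
  · intro h; cases t with
    | nil => simp at h
    | cons x r => simp at h; exact ⟨r, by simp [h]⟩

lemma pvFind_single_eq_idxOf (s : List Char) (c : Char) (h : c ∈ s) :
    PySem.Chars.find s [c] = (s.idxOf c : Int) := by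
  have h0 : 0 ≤ PySem.Chars.find s [c] :=
    (PySem.Chars.find_nonneg_iff s [c]).mpr ((List.singleton_infix_iff c s).mpr h)
  obtain ⟨hpre, hmin⟩ := PySem.Chars.find_spec h0
  set k := (PySem.Chars.find s [c]).toNat with hkdef
  have hkl : k < s.length := by
    have := PySem.Chars.find_le_length s [c]
    rcases Nat.lt_or_ge k s.length with h1 | h1
    · exact h1
    · exfalso
      have : s.drop k = [] := List.drop_eq_nil_of_le h1
      rw [pvSingleton_prefix, this] at hpre; simp at hpre
  have hsk : s[k] = c := by
    have := (pvSingleton_prefix c (s.drop k)).mp hpre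
    rw [List.head?_drop] at this
    simpa [List.getElem?_eq_getElem hkl] using this
  have hle : s.idxOf c ≤ k := pvIdxOf_le_of_getElem s c k hkl hsk
  have hge : k ≤ s.idxOf c := by
    by_contra hlt
    push_neg at hlt
    have hidx : s[s.idxOf c]'(List.idxOf_lt_length_of_mem h) = c := List.getElem_idxOf _
    exact hmin _ hlt ((pvSingleton_prefix c _).mpr
      (by rw [List.head?_drop, List.getElem?_eq_getElem (List.idxOf_lt_length_of_mem h)]; simp [hidx]))
  have : s.idxOf c = k := le_antisymm hle hge
  omega

lemma pvCol_decomp (col : List Char) (h1 : col.count '-' = 1) :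
    col = col.takeWhile (fun c => c ≠ '-') ++ '-' :: (col.dropWhile (fun c => c ≠ '-')).tail ∧
    '-' ∉ col.takeWhile (fun c => c ≠ '-') ∧
    '-' ∉ (col.dropWhile (fun c => c ≠ '-')).tail := by
  have hmem : '-' ∈ col := List.count_pos_iff.mp (by omega)
  have hntw : '-' ∉ col.takeWhile (fun c => c ≠ '-') := by
    intro hm
    have := List.mem_takeWhile_imp hm
    simp at this
  have hdw : '-' ∈ col.dropWhile (fun c => c ≠ '-') := by
    have := List.takeWhile_append_dropWhile (p := fun c => (c ≠ '-' : Bool)) (l := col)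
    rcases List.mem_append.mp (by rw [this]; exact hmem) with h | h
    · exact absurd h hntw
    · exact h
  have hne : col.dropWhile (fun c => c ≠ '-') ≠ [] := by
    intro h0; rw [h0] at hdw; simp at hdw
  have hhead : (col.dropWhile (fun c => c ≠ '-')).head hne = '-' := by
    have := List.head_dropWhile_not (fun c => (c ≠ '-' : Bool)) hne
    simpa using this
  have hsplit : col = col.takeWhile (fun c => c ≠ '-') ++ '-' :: (col.dropWhile (fun c => c ≠ '-')).tail := by
    conv_lhs => rw [← List.takeWhile_append_dropWhile (p := fun c => (c ≠ '-' : Bool)) (l := col)]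
    congr 1
    have h5 := List.cons_head_tail hne
    rw [hhead] at h5
    exact h5.symm
  refine ⟨hsplit, hntw, ?_⟩
  have h2 : (col.takeWhile (fun c => c ≠ '-')).count '-' = 0 := List.count_eq_zero.mpr hntw
  have h4 := h1
  rw [hsplit, List.count_append, List.count_cons_self, h2] at h4
  exact List.count_eq_zero.mp (by omega)

-- B's state machine: one step, by branch
lemma abStep_preNoStar (p q : Int) (sp : Option Int) (c : Char) (hc : c ≠ '-') :
    abStep (false, p, none, q, sp) c
      = (false, p + 1, (if c = '*' then some p else none), q, sp) := by
  simp [abStep, hc]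

lemma abStep_preStar (p s q : Int) (sp : Option Int) (c : Char) (hc : c ≠ '-') :
    abStep (false, p, some s, q, sp) c = (false, p + 1, some s, q, sp) := by
  simp [abStep, hc]

lemma abStep_beam (p q : Int) (star sp : Option Int) :
    abStep (false, p, star, q, sp) '-' = (true, p, star, q, sp) := by
  simp [abStep]

lemma abStep_postNoSpace (p q : Int) (st : Option Int) (c : Char) :
    abStep (true, p, st, q, none) c
      = (true, p, st, q + 1, (if c = ' ' then some q else none)) := by
  simp [abStep]

lemma abStep_postSpace (p q sp : Int) (st : Option Int) (c : Char) :
    abStep (true, p, st, q, some sp) c = (true, p, st, q + 1, some sp) := by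
  simp [abStep]

-- B's state machine over the part above the beam
lemma pvUp_some (up : List Char) (h : '-' ∉ up) (p s q : Int) (sp : Option Int) :
    List.foldl abStep (false, p, some s, q, sp) up = (false, p + up.length, some s, q, sp) := by
  induction up generalizing p with
  | nil => simp
  | cons c u ih =>
    have hc : c ≠ '-' := fun hc => h (hc ▸ List.mem_cons_self)
    rw [List.foldl_cons, abStep_preStar p s q sp c hc, ih (fun hm => h (List.mem_cons_of_mem _ hm))]
    simp only [List.length_cons, Prod.mk.injEq, and_true, true_and]
    push_cast; omega

lemma pvUp_none (up : List Char) (h : '-' ∉ up) (p q : Int) (sp : Option Int) :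
    List.foldl abStep (false, p, none, q, sp) up
      = (false, p + up.length,
         (if '*' ∈ up then some (p + (up.idxOf '*' : Int)) else none), q, sp) := by
  induction up generalizing p with
  | nil => simp
  | cons c u ih =>
    have hc : c ≠ '-' := fun hc => h (hc ▸ List.mem_cons_self)
    have hu : '-' ∉ u := fun hm => h (List.mem_cons_of_mem _ hm)
    rw [List.foldl_cons, abStep_preNoStar p q sp c hc]
    by_cases hstar : c = '*'
    · subst hstar
      rw [if_pos rfl, pvUp_some u hu]
      simp [List.idxOf_cons_self]
      push_cast; omega
    · rw [if_neg hstar, ih hu]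
      have hm1 : ('*' ∈ c :: u) ↔ ('*' ∈ u) := by simp [Ne.symm hstar]
      simp only [List.length_cons, hm1, List.idxOf_cons_ne _ hstar, Prod.mk.injEq, true_and, and_true]
      split_ifs with hm <;> simp <;> omega

-- B's state machine below the beam
lemma pvDown_some (l : List Char) (p q sp : Int) (st : Option Int) :
    List.foldl abStep (true, p, st, q, some sp) l = (true, p, st, q + l.length, some sp) := by
  induction l generalizing q with
  | nil => simp
  | cons c u ih =>
    rw [List.foldl_cons, abStep_postSpace, ih]
    simp only [List.length_cons, Prod.mk.injEq, and_true, true_and]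
    push_cast; omega

lemma pvDown_none (l : List Char) (p q : Int) (st : Option Int) :
    List.foldl abStep (true, p, st, q, none) l
      = (true, p, st, q + l.length,
         (if ' ' ∈ l then some (q + (l.idxOf ' ' : Int)) else none)) := by
  induction l generalizing q with
  | nil => simp
  | cons c u ih =>
    rw [List.foldl_cons, abStep_postNoSpace]
    by_cases hsp : c = ' '
    · subst hsp
      rw [if_pos rfl, pvDown_some]
      simp [List.idxOf_cons_self]
      push_cast; omega
    · rw [if_neg hsp, ih]
      have hm1 : (' ' ∈ c :: u) ↔ (' ' ∈ u) := by simp [Ne.symm hsp]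
      simp only [List.length_cons, hm1, List.idxOf_cons_ne _ hsp, Prod.mk.injEq, true_and, and_true]
      split_ifs with hm <;> simp <;> omega

-- the whole column through B's machine
lemma pvCol_state (up down : List Char) (hup : '-' ∉ up) :
    List.foldl abStep ((false, 0, none, 0, none) : Bool × Int × Option Int × Int × Option Int)
        (up ++ '-' :: down)
      = (true, (up.length : Int),
         (if '*' ∈ up then some ((up.idxOf '*' : Int)) else none), (down.length : Int),
         (if ' ' ∈ down then some ((down.idxOf ' ' : Int)) else none)) := by
  rw [List.foldl_append, pvUp_none up hup, List.foldl_cons, abStep_beam, pvDown_none]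
  simp

-- the row-major fold keeps one state per column …
lemma pvFoldl_zip_length (rows : List (List Char))
    (sts : List (Bool × Int × Option Int × Int × Option Int))
    (h : ∀ r ∈ rows, sts.length ≤ r.length) :
    (rows.foldl (fun ss row => List.zipWith abStep ss row) sts).length = sts.length := by
  induction rows generalizing sts with
  | nil => rfl
  | cons row rest ih =>
    rw [List.foldl_cons]
    have hlen : (List.zipWith abStep sts row).length = sts.length := by
      rw [List.length_zipWith]
      exact Nat.min_eq_left (h row List.mem_cons_self)
    rw [ih _ (fun r hr => hlen ▸ h r (List.mem_cons_of_mem _ hr)), hlen]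

-- … and, projected to column j, is exactly the column fold (transpose lemma)
lemma pvFoldl_zip_getD (rows : List (List Char))
    (sts : List (Bool × Int × Option Int × Int × Option Int))
    (h : ∀ r ∈ rows, sts.length ≤ r.length) (j : Nat) (hj : j < sts.length)
    (d0 : Bool × Int × Option Int × Int × Option Int) :
    (rows.foldl (fun ss row => List.zipWith abStep ss row) sts).getD j d0
      = List.foldl abStep (sts.getD j d0) (rows.map (fun r => r.getD j ' ')) := by
  induction rows generalizing sts with
  | nil => rfl
  | cons row rest ih =>
    have hrow := h row List.mem_cons_self
    have hlen : (List.zipWith abStep sts row).length = sts.length := by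
      rw [List.length_zipWith]; exact Nat.min_eq_left hrow
    rw [List.foldl_cons, List.map_cons, List.foldl_cons,
      ih _ (fun r hr => hlen ▸ h r (List.mem_cons_of_mem _ hr)) (hlen ▸ hj)]
    congr 1
    rw [List.getD_eq_getElem _ _ (hlen ▸ hj), List.getElem_zipWith,
      List.getD_eq_getElem _ _ hj, List.getD_eq_getElem _ _ (by omega : j < row.length)]

-- A's rebuilt column string is column j of the grid
lemma pvColumn_eq (arr : List (List Char)) (j : Nat) :
    (PySem.List.pyRange 0 (PySem.List.len arr)).map
        (fun i => (PySem.List.pyGet? (PySem.List.pyGetD arr i []) (j : Int)).getD ' ')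
      = pvCol arr j := by
  rw [show (fun i => (PySem.List.pyGet? (PySem.List.pyGetD arr i []) (j : Int)).getD ' ')
      = (fun r => (PySem.List.pyGet? r (j : Int)).getD ' ') ∘ (fun i => PySem.List.pyGetD arr i []) from rfl,
    ← List.map_map, PySem.List.map_pyGetD_pyRange_zero]
  exact List.map_congr_left (fun r _ => by
    rw [PySem.List.pyGet?_natCast, List.getD_eq_getElem?_getD])

-- the two programs, with the line list and its preconditions abstracted out
lemma pvMain (arr : List (List Char)) (n : Nat) (hn : n = (PySem.List.pyGetD arr 0 []).length)
    (hlen : ∀ r ∈ arr, n ≤ r.length)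
    (hcol : ∀ j < n, (pvCol arr j).count '-' = 1 ∧
      '*' ∈ (pvCol arr j).takeWhile (fun c => c ≠ '-') ∧
      ' ' ∈ ((pvCol arr j).dropWhile (fun c => c ≠ '-')).tail) :
    (PySem.List.pyRange 0 (PySem.List.len (PySem.List.pyGetD arr 0 []))).foldl
      (fun ans j =>
        let s : List Char := (PySem.List.pyRange 0 (PySem.List.len arr)).map
          (fun i => (PySem.List.pyGet? (PySem.List.pyGetD arr i []) j).getD ' ')
        match PySem.Chars.splitOn s ['-'] with
        | [up, down] =>
            ans * 10 + (PySem.Chars.find up ['*'] * 5 + PySem.Chars.find down [' '])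
        | _ => 0) 0
    = (arr.foldl (fun sts row => List.zipWith abStep sts row)
        (List.replicate n ((false, 0, none, 0, none) : Bool × Int × Option Int × Int × Option Int))).foldl
        (fun ans st => ans * 10 + st.2.2.1.getD 0 * 5 + st.2.2.2.2.getD 0) 0 := by
  have hlenA : PySem.List.len (PySem.List.pyGetD arr 0 []) = (n : Int) := by
    simp [PySem.List.len, hn]
  rw [hlenA, PySem.List.pyRange_zero_nat n, List.foldl_map]
  have hstates : arr.foldl (fun sts row => List.zipWith abStep sts row)
      (List.replicate n ((false, 0, none, 0, none) : Bool × Int × Option Int × Int × Option Int))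
    = (List.range n).map (fun j =>
        List.foldl abStep ((false, 0, none, 0, none) : Bool × Int × Option Int × Int × Option Int)
          (pvCol arr j)) := by
    apply List.ext_getElem
    · rw [pvFoldl_zip_length arr _ (by simpa using hlen)]; simp
    · intro i h1 h2
      rw [← List.getD_eq_getElem _ ((false, 0, none, 0, none) :
            Bool × Int × Option Int × Int × Option Int) h1,
        pvFoldl_zip_getD arr _ (by simpa using hlen) i
          (by rw [pvFoldl_zip_length arr _ (by simpa using hlen)] at h1; simpa using h1) _,
        List.getD_replicate]
      · simp only [List.getElem_map, List.getElem_range]; rfl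
      · rw [pvFoldl_zip_length arr _ (by simpa using hlen)] at h1; simpa using h1
  rw [hstates, List.foldl_map]
  apply PySem.List.foldl_congr_mem
  intro ans j hj
  have hjn : j < n := List.mem_range.mp hj
  obtain ⟨hc1, hc2, hc3⟩ := hcol j hjn
  obtain ⟨hdec, hup, hdown⟩ := pvCol_decomp _ hc1
  simp only [pvColumn_eq arr j]
  rw [hdec, pvSplitOn_decomp _ _ hup hdown]
  show ans * 10 + (PySem.Chars.find _ ['*'] * 5 + PySem.Chars.find _ [' ']) = _
  rw [pvCol_state _ _ hup, if_pos hc2, if_pos hc3,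
    pvFind_single_eq_idxOf _ _ hc2, pvFind_single_eq_idxOf _ _ hc3]
  simp only [Option.getD_some]
  ring

-- ===== VERDICT (by name: the statement is the Claim_ definition above) =====
theorem read_abacus_spec : Claim_equal_read_abacus := by
  intro abacus _ hpre
  obtain ⟨hlen, hcol⟩ := hpre
  exact pvMain _ _ rfl hlen hcol
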